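-- pv_equiv track=rewrite | github.com/canlion/efficientdet | rebuild/utils.py | get_feature_sizes
-- ===== SOURCE A (Python) =====
-- from typing import Tuple
-- from math import ceil
--
-- def get_feature_sizes(img_size: Tuple[int, int],
--                       min_level: int,
--                       max_level: int):
--     feature_size_list = [img_size]
--     for _ in range(max_level):
--         feature_size_list.append((
--             ceil(feature_size_list[-1][0] / 2),
--             ceil(feature_size_list[-1][1] / 2),
--         ))
--
--     return feature_size_list[min_level: max_level+1]
-- ===== SOURCE B (Python) =====
-- def get_feature_sizes(img_size, min_level, max_level):
--     w, h = img_size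
--     sizes = [img_size] + [(-(-w >> lv), -(-h >> lv))
--                           for lv in range(1, max_level + 1)]
--     return sizes[min_level: max_level + 1]
-- ===== Notes on version B (the rewrite author's own statement) =====
-- stated objective: alternative
-- what changed: Replaces A's dependent recurrence (each level ceil-halves the previous list entry, appending to a growing list read via [-1]) with an independent closed form per level: a comprehension computing ceil(dim/2^level) directly from the original image size as -(-dim >> level).
import Mathlib
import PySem

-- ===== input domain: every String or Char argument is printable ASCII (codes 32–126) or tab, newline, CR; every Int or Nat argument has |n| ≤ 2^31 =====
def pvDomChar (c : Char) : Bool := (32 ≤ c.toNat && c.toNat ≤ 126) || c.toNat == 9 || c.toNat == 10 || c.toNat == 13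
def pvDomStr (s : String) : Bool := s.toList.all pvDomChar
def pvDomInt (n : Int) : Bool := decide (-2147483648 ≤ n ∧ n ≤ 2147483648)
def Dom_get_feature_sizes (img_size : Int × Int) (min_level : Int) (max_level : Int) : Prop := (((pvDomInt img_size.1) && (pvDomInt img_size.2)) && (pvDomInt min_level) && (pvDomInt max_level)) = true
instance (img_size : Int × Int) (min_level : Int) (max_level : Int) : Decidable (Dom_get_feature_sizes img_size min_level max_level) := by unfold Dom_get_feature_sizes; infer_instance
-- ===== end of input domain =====

-- B computes each pyramid level directly as ceil(dim / 2^level) from the original image size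
-- (independent closed form per level) instead of A's dependent recurrence that repeatedly
-- ceil-halves the last appended list entry; same cost, plainer structure.


-- ===== PORT A =====
-- ceil(x / 2): Python's math.ceil(x / 2) — exact for |x| ≤ 2^31 (float true division is exact there)
def pvCeilHalf (x : Int) : Int := -(PySem.Int.floordiv (-x) 2)

def get_feature_sizes (img_size : Int × Int) (min_level : Int) (max_level : Int) : List (Int × Int) :=
  let feature_size_list :=
    (PySem.List.pyRange 0 max_level).foldl
      (fun acc _ =>
        let last := acc.getLastD (0, 0)   -- acc[-1]; acc is never empty
        acc ++ [(pvCeilHalf last.1, pvCeilHalf last.2)])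
      [img_size]
  PySem.List.slice feature_size_list (some min_level) (some (max_level + 1))

-- ===== PORT B =====
-- -(-x >> lv): integer ceiling division by 2^lv via arithmetic right shift (lv ≥ 1 inside the range;
-- Python's >> is Lean's >>> on Int per PYSEM.md)
def pvCeilPow (x : Int) (lv : Int) : Int := -((-x) >>> lv.toNat)

def get_feature_sizes_alt (img_size : Int × Int) (min_level : Int) (max_level : Int) : List (Int × Int) :=
  let w := img_size.1
  let h := img_size.2
  let sizes := [img_size] ++
    (PySem.List.pyRange 1 (max_level + 1)).map (fun lv => (pvCeilPow w lv, pvCeilPow h lv))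
  PySem.List.slice sizes (some min_level) (some (max_level + 1))

-- ===== PRECONDITION & SPEC =====
def Spec_get_feature_sizes (img_size : Int × Int) (min_level : Int) (max_level : Int) (out : List (Int × Int)) : Prop := out = get_feature_sizes_alt img_size min_level max_level
instance (img_size : Int × Int) (min_level : Int) (max_level : Int) (out : List (Int × Int)) : Decidable (Spec_get_feature_sizes img_size min_level max_level out) := by unfold Spec_get_feature_sizes; infer_instance

-- ===== CLAIM (what is proved, stated in full; the proofs are below) =====
def Claim_equal_get_feature_sizes : Prop := ∀ (img_size : Int × Int) (min_level : Int) (max_level : Int), Dom_get_feature_sizes img_size min_level max_level → Spec_get_feature_sizes img_size min_level max_level (get_feature_sizes img_size min_level max_level)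

-- ===== LEMMAS AND PROOFS =====

-- ceil-halving a level-n size gives the level-(n+1) size
theorem pvCeilHalf_ceilPow (x : Int) (n : Nat) :
    pvCeilHalf (pvCeilPow x (n : Int)) = pvCeilPow x ((n : Int) + 1) := by
  unfold pvCeilHalf pvCeilPow
  have h2 : ((n : Int) + 1).toNat = n + 1 := by omega
  rw [h2, Int.toNat_natCast, neg_neg,
    PySem.Int.floordiv_eq_ediv_of_pos (by omega : (0:Int) < 2),
    Int.shiftRight_eq_div_pow, Int.shiftRight_eq_div_pow,
    Int.ediv_ediv_of_nonneg (by positivity : (0:Int) ≤ ((2 ^ n : Nat) : Int)), pow_succ]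
  push_cast
  ring_nf

-- B's full list written as a map over levels 0..n
theorem pvB_list (img : Int × Int) (n : Nat) :
    [img] ++ (PySem.List.pyRange 1 ((n : Int) + 1)).map
        (fun lv => (pvCeilPow img.1 lv, pvCeilPow img.2 lv))
      = (List.range (n + 1)).map
        (fun (k : Nat) => (pvCeilPow img.1 (k : Int), pvCeilPow img.2 (k : Int))) := by
  have h0 : pvCeilPow img.1 (0 : Int) = img.1 := by
    simp [pvCeilPow]
  have h0' : pvCeilPow img.2 (0 : Int) = img.2 := by
    simp [pvCeilPow]
  have : PySem.List.pyRange 0 ((n : Int) + 1) =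
      0 :: PySem.List.pyRange 1 ((n : Int) + 1) := by
    have := PySem.List.pyRange_one_cons (a := 0) (b := (n : Int) + 1) (by omega)
    simpa using this
  have hz : ((n : Int) + 1) = ((n + 1 : Nat) : Int) := by push_cast; ring
  calc [img] ++ (PySem.List.pyRange 1 ((n : Int) + 1)).map
        (fun lv => (pvCeilPow img.1 lv, pvCeilPow img.2 lv))
      = (PySem.List.pyRange 0 ((n : Int) + 1)).map
        (fun lv => (pvCeilPow img.1 lv, pvCeilPow img.2 lv)) := by
        rw [this, List.map_cons, h0, h0', Prod.mk.eta, List.singleton_append]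
    _ = _ := by
        rw [hz, PySem.List.pyRange_zero_natCast, List.map_map]
        rfl

-- A's fold builds exactly that map
theorem pvA_list (img : Int × Int) (n : Nat) :
    (PySem.List.pyRange 0 (n : Int)).foldl
      (fun acc _ =>
        let last := acc.getLastD (0, 0)
        acc ++ [(pvCeilHalf last.1, pvCeilHalf last.2)])
      [img]
    = (List.range (n + 1)).map
        (fun (k : Nat) => (pvCeilPow img.1 (k : Int), pvCeilPow img.2 (k : Int))) := by
  induction n with
  | zero =>
    simp [PySem.List.pyRange, pvCeilPow]
  | succ n ih =>
    have hr : PySem.List.pyRange 0 ((n : Int) + 1) =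
        PySem.List.pyRange 0 (n : Int) ++ [(n : Int)] :=
      PySem.List.pyRange_one_succ_right (by omega)
    have hc : ((n : Int) + 1) = (((n + 1) : Nat) : Int) := by push_cast; ring
    rw [← hc, hr, List.foldl_append, ih]
    simp only [List.foldl_cons, List.foldl_nil]
    have hlast : ((List.range (n + 1)).map
        (fun (k : Nat) => (pvCeilPow img.1 (k : Int), pvCeilPow img.2 (k : Int)))).getLastD (0, 0)
        = (pvCeilPow img.1 (n : Int), pvCeilPow img.2 (n : Int)) := by
      simp [List.range_succ]
    rw [List.range_succ (n := n + 1), List.map_append]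
    simp only [hlast, List.map_cons, List.map_nil]
    rw [pvCeilHalf_ceilPow, pvCeilHalf_ceilPow]
    push_cast
    ring_nf

-- the two full lists coincide for every max_level
theorem pv_lists_eq (img : Int × Int) (m : Int) :
    (PySem.List.pyRange 0 m).foldl
      (fun acc _ =>
        let last := acc.getLastD (0, 0)
        acc ++ [(pvCeilHalf last.1, pvCeilHalf last.2)])
      [img]
    = [img] ++ (PySem.List.pyRange 1 (m + 1)).map
        (fun lv => (pvCeilPow img.1 lv, pvCeilPow img.2 lv)) := by
  by_cases h : m ≤ 0
  · have h1 : PySem.List.pyRange 0 m = [] := by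
      simp [PySem.List.pyRange]; omega
    have h2 : PySem.List.pyRange 1 (m + 1) = [] := by
      simp [PySem.List.pyRange]; omega
    simp [h1, h2]
  · obtain ⟨n, rfl⟩ : ∃ n : Nat, m = (n : Int) := ⟨m.toNat, by omega⟩
    rw [pvA_list, pvB_list]

-- ===== VERDICT (by name: the statement is the Claim_ definition above) =====
theorem get_feature_sizes_spec : Claim_equal_get_feature_sizes := by
  intro img_size min_level max_level _
  unfold Spec_get_feature_sizes get_feature_sizes get_feature_sizes_alt
  rw [pv_lists_eq]
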